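-- pv_equiv track=rewrite | github.com/RachelPun/AoC2015 | Day 3/main.py | get_visited_dict
-- ===== SOURCE A (Python) =====
-- def get_visited_dict(instructions: str) -> dict:
--     """Return a dictionary of location:visit_count."""
--
--     visited = {(0, 0): 1}
--     x, y = 0, 0
--
--     for instruction in instructions:
--
--         if instruction == "^":
--             y += 1
--         if instruction == "v":
--             y -= 1
--         if instruction == "<":
--             x -= 1
--         if instruction == ">":
--             x += 1
--
--         if (x, y) in visited.keys():
--             visited[(x, y)] += 1
--         else:
--             visited[(x, y)] = 1
--
--     return visited
-- ===== SOURCE B (Python) =====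
-- def get_visited_dict(instructions: str) -> dict:
--     """Return a dictionary of location:visit_count."""
--     # Stage 1: build the whole trajectory, start included.
--     x, y = 0, 0
--     positions = [(0, 0)]
--     for c in instructions:
--         if c == "^":
--             y += 1
--         elif c == "v":
--             y -= 1
--         elif c == "<":
--             x -= 1
--         elif c == ">":
--             x += 1
--         positions.append((x, y))
--     # Stage 2: distinct squares in first-visit order, then count each in the trajectory.
--     seen = list(dict.fromkeys(positions))
--     return {p: positions.count(p) for p in seen}
-- ===== Notes on version B (the rewrite author's own statement) =====
-- stated objective: alternative
-- what changed: A counts while moving, bumping a running dict after every step; B keeps no counts during the walk: it records the full trajectory, dedups it to the distinct squares in first-visit order, and computes each square's count by scanning the trajectory with list.count (no running tally at all), trading A's O(n) hash-count loop for an O(n*k) scan-per-distinct-square pass.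
import Mathlib
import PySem

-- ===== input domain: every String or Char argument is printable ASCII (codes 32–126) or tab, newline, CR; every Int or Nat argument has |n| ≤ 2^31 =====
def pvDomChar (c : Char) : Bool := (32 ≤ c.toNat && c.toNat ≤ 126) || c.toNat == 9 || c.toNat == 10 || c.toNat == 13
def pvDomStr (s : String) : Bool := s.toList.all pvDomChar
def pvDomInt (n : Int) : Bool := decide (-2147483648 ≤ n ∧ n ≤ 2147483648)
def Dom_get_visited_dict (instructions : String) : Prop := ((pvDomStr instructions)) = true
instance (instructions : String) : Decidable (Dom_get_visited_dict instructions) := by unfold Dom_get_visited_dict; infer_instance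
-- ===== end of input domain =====

-- B keeps no running tally: it records the trajectory, dedups it, and counts each distinct square by scanning (objective: alternative).

-- ===== PORT A =====
-- one loop: move, then bump the count of the current square in the dict
def pvStepA (st : PySem.Dict (Int × Int) Int × Int × Int) (instruction : Char) :
    PySem.Dict (Int × Int) Int × Int × Int :=
  let x := st.2.1
  let y := st.2.2
  let y := if instruction = '^' then y + 1 else y
  let y := if instruction = 'v' then y - 1 else y
  let x := if instruction = '<' then x - 1 else x
  let x := if instruction = '>' then x + 1 else x
  let visited :=
    if st.1.contains (x, y) then st.1.insert (x, y) (st.1.getD (x, y) 0 + 1)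
    else st.1.insert (x, y) 1
  (visited, x, y)

def get_visited_dict (instructions : String) : List (Int × Int × Int) :=
  let st := instructions.toList.foldl pvStepA (PySem.Dict.empty.insert (0, 0) 1, 0, 0)
  st.1.items.map (fun p => (p.1.1, p.1.2, p.2))

-- ===== PORT B =====
-- B-side helper: stage-1 step, appends the post-move square to the trajectory
def pvStepB (st : List (Int × Int) × Int × Int) (c : Char) :
    List (Int × Int) × Int × Int :=
  let x := st.2.1
  let y := st.2.2
  let p : Int × Int :=
    if c = '^' then (x, y + 1)
    else if c = 'v' then (x, y - 1)
    else if c = '<' then (x - 1, y)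
    else if c = '>' then (x + 1, y)
    else (x, y)
  (st.1 ++ [p], p)

def get_visited_dict_alt (instructions : String) : List (Int × Int × Int) :=
  -- stage 1: trajectory; stage 2: dict.fromkeys dedup, then positions.count per distinct square
  let st := instructions.toList.foldl pvStepB ([(0, 0)], 0, 0)
  let seen := PySem.List.dedup st.1
  seen.map (fun p => (p.1, p.2, (st.1.count p : Int)))

-- ===== PRECONDITION & SPEC =====
def Spec_get_visited_dict (instructions : String) (out : List (Int × Int × Int)) : Prop := out = get_visited_dict_alt instructions
instance (instructions : String) (out : List (Int × Int × Int)) : Decidable (Spec_get_visited_dict instructions out) := by unfold Spec_get_visited_dict; infer_instance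

-- ===== CLAIM =====
def Claim_equal_get_visited_dict : Prop := ∀ (instructions : String), Dom_get_visited_dict instructions → Spec_get_visited_dict instructions (get_visited_dict instructions)

-- ===== LEMMAS AND PROOFS =====

-- A's membership-test-then-bump is exactly Counter's modify step
lemma pv_insert_count (d : PySem.Dict (Int × Int) Int) (k : Int × Int) :
    (if d.contains k then d.insert k (d.getD k 0 + 1) else d.insert k 1) =
      d.modify k 0 (· + 1) := by
  cases h : d.contains k with
  | true => simp [PySem.Dict.modify]
  | false => simp [PySem.Dict.modify, h, PySem.Dict.getD_of_not_contains]

-- one step of A on a Counter state is one step of B followed by counting the new square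
lemma pv_step_comm (ps : List (Int × Int)) (x y : Int) (c : Char) :
    pvStepA (PySem.Dict.counter ps, x, y) c =
      (PySem.Dict.counter (pvStepB (ps, x, y) c).1, (pvStepB (ps, x, y) c).2) := by
  simp only [pvStepA, pvStepB, PySem.Dict.counter_append_singleton, ← pv_insert_count]
  by_cases h1 : c = '^'
  · subst h1; simp
  by_cases h2 : c = 'v'
  · subst h2; simp [sub_eq_add_neg]
  by_cases h3 : c = '<'
  · subst h3; simp [sub_eq_add_neg]
  by_cases h4 : c = '>'
  · subst h4; simp
  simp [h1, h2, h3, h4]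

-- the whole of A's fold is Counter of B's trajectory
lemma pv_fold_comm (cs : List Char) : ∀ (ps : List (Int × Int)) (x y : Int),
    cs.foldl pvStepA (PySem.Dict.counter ps, x, y) =
      (PySem.Dict.counter (cs.foldl pvStepB (ps, x, y)).1,
        (cs.foldl pvStepB (ps, x, y)).2) := by
  induction cs with
  | nil => intro ps x y; rfl
  | cons c cs ih =>
    intro ps x y
    simp only [List.foldl_cons, pv_step_comm]
    simpa using ih (pvStepB (ps, x, y) c).1 (pvStepB (ps, x, y) c).2.1 (pvStepB (ps, x, y) c).2.2

-- ===== VERDICT =====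
theorem get_visited_dict_spec : Claim_equal_get_visited_dict := by
  intro s _
  unfold Spec_get_visited_dict
  simp only [get_visited_dict, get_visited_dict_alt]
  have h0 : PySem.Dict.empty.insert ((0 : Int), (0 : Int)) (1 : Int) =
      PySem.Dict.counter [((0 : Int), (0 : Int))] := by decide
  rw [h0, pv_fold_comm]
  simp [PySem.Dict.items_counter, PySem.List.dedup_eq_ofList]
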